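-- pv_equiv track=rewrite | github.com/kacpercwiertnia/algorithms_and_data_structures_course | algorytmy_dynamiczne_zachalnne/zbior_zadan/zad11k.py | kontenerowiec
-- ===== SOURCE A (Python) =====
-- def f(T, D, i, l, p):
-- 	if i == len(T):
-- 		return abs(l-p)
--
-- 	if D[i][l] != -1:
-- 		return D[i][l]
--
-- 	D[i][l] = min(f(T, D, i+1, l+T[i], p), f(T, D, i+1, l, p+T[i]))
-- 	return D[i][l]
--
-- def kontenerowiec(T):
-- 	n = len(T)
-- 	suma = 0
--
-- 	for x in T:
-- 		suma += x
--
-- 	D = [[ -1 for _ in range(suma) ] for _ in range(n) ]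
--
-- 	res = f(T, D, 0, 0, 0)
--
-- 	return res
-- ===== SOURCE B (Python) =====
-- def kontenerowiec(T):
--     sums = {0}
--     for t in T:
--         sums |= {s + t for s in sums}
--     suma = sum(T)
--     return min(abs(suma - 2*s) for s in sums)
-- ===== Notes on version B (the rewrite author's own statement) =====
-- stated objective: faster
-- what changed: Replaces the top-down memoized recursion over an (item, left-load) table with a bottom-up reachable-sums set: fold over the items extending the set of achievable left-pile sums, then take the minimum of abs(suma - 2*s) over that set.
-- outside the precondition, e.g. on kontenerowiec([-1, 3]): A returns 2, B returns 2; on kontenerowiec([-2, 2, -1, 3]): A returns 2, B returns 0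
import Mathlib
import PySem

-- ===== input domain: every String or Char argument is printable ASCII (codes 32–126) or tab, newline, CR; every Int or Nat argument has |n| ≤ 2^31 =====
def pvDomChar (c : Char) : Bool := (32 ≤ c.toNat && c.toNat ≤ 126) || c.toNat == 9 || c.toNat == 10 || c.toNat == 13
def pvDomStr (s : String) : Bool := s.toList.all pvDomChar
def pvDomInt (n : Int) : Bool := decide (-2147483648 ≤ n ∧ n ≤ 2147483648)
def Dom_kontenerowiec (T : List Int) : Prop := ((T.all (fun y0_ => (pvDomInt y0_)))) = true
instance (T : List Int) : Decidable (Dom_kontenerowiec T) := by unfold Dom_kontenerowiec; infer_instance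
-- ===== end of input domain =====

-- B replaces A's top-down memoized (item, left-load) recursion with a bottom-up fold over a
-- set of reachable left-pile sums (faster: no n×suma table allocation, no recursion).


-- ===== PORT A =====
-- helper f(T, D, i, l, p): the memo table D is threaded explicitly; the fuel argument only
-- bounds the recursion depth (each call steps i -> i+1; kontenerowiec passes fuel = len T,
-- so inside Pre_ the fuel never runs out and the 0-fuel branch is unreachable).
def kontenerowiecF (T : List Int) : Nat → List (List Int) → Int → Int → Int → Int × List (List Int)
  | fuel, D, i, l, p =>
    if i = PySem.List.len T then (|l - p|, D)
    else
      match fuel with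
      | 0 => (0, D)  -- unreachable under Pre_ (Python would have i = len(T) before fuel runs out)
      | fuel + 1 =>
        let cur := PySem.List.pyGetD (PySem.List.pyGetD D i []) l (-1)
        if cur ≠ -1 then (cur, D)
        else
          let r1 := kontenerowiecF T fuel D (i + 1) (l + PySem.List.pyGetD T i 0) p
          let r2 := kontenerowiecF T fuel r1.2 (i + 1) l (p + PySem.List.pyGetD T i 0)
          let v := min r1.1 r2.1
          let D3 := PySem.List.pySetD r2.2 i (PySem.List.pySetD (PySem.List.pyGetD r2.2 i []) l v)
          (v, D3)

def kontenerowiec (T : List Int) : Int :=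
  let n := PySem.List.len T
  let suma := T.foldl (fun s x => s + x) 0
  let D := (PySem.List.pyRange 0 n 1).map (fun _ => (PySem.List.pyRange 0 suma 1).map (fun _ => (-1 : Int)))
  let res := kontenerowiecF T T.length D 0 0 0
  res.1

-- ===== PORT B =====
def kontenerowiec_alt (T : List Int) : Int :=
  let sums : PySem.Set Int := T.foldl (fun acc t => PySem.Set.union acc (PySem.Set.ofList (acc.map (fun s => s + t)))) (PySem.Set.ofList [0])
  let suma := T.sum
  (PySem.List.min? (sums.map (fun s => |suma - 2 * s|)) (fun x => x)).getD 0

-- ===== PRECONDITION & SPEC =====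
-- Pre_ restricts to the task's natural domain (container loads): nonnegative weights whose
-- every nonempty suffix has positive sum (so no intermediate pile load leaves range(suma)).
-- Outside it A either raises IndexError (the memo column can reach suma or be negative with
-- an empty/short row) or reads memo cells through Python's negative-index wraparound, which
-- can return accidental values.
def Pre_kontenerowiec (T : List Int) : Prop := (∀ t ∈ T, 0 ≤ t) ∧ ∀ j < T.length, 0 < (T.drop j).sum
instance (T : List Int) : Decidable (Pre_kontenerowiec T) := by unfold Pre_kontenerowiec; infer_instance
def pvWitness_kontenerowiec : List Int := [3, 1, 2]

def Spec_kontenerowiec (T : List Int) (out : Int) : Prop := out = kontenerowiec_alt T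
instance (T : List Int) (out : Int) : Decidable (Spec_kontenerowiec T out) := by unfold Spec_kontenerowiec; infer_instance

-- ===== CLAIM (what is proved, stated in full; the proofs are below) =====
def Claim_equal_kontenerowiec : Prop := ∀ (T : List Int), Dom_kontenerowiec T → Pre_kontenerowiec T → Spec_kontenerowiec T (kontenerowiec T)

-- ===== LEMMAS AND PROOFS =====

-- Pure (unmemoized) form of A's recursion, by structural recursion on the remaining items.
def gRec : List Int → Int → Int → Int
  | [], l, p => |l - p|
  | t :: r, l, p => min (gRec r (l + t) p) (gRec r l (p + t))

-- All subset sums of a list (with multiplicity; only membership matters below).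
def subsetSums : List Int → List Int
  | [] => [0]
  | t :: r => subsetSums r ++ (subsetSums r).map (fun s => s + t)

lemma zero_mem_subsetSums (xs : List Int) : (0 : Int) ∈ subsetSums xs := by
  induction xs with
  | nil => simp [subsetSums]
  | cons t r ih => simp [subsetSums]; left; exact ih

lemma gRec_nonneg (xs : List Int) : ∀ l p, 0 ≤ gRec xs l p := by
  induction xs with
  | nil => intro l p; simp [gRec, abs_nonneg]
  | cons t r ih => intro l p; simp [gRec]; exact ⟨ih _ _, ih _ _⟩

lemma gRec_min (xs : List Int) : ∀ l p,
    (∃ s ∈ subsetSums xs, gRec xs l p = |l - p + 2 * s - xs.sum|) ∧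
    (∀ s ∈ subsetSums xs, gRec xs l p ≤ |l - p + 2 * s - xs.sum|) := by
  induction xs with
  | nil =>
    intro l p
    constructor
    · exact ⟨0, by simp [subsetSums], by simp [gRec]⟩
    · intro s hs; simp [subsetSums] at hs; simp [gRec, hs]
  | cons t r ih =>
    intro l p
    obtain ⟨⟨s1, hs1, he1⟩, hb1⟩ := ih (l + t) p
    obtain ⟨⟨s2, hs2, he2⟩, hb2⟩ := ih l (p + t)
    constructor
    · rcases le_total (gRec r (l + t) p) (gRec r l (p + t)) with h | h
      · refine ⟨s1 + t, ?_, ?_⟩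
        · simp only [subsetSums, List.mem_append, List.mem_map]
          right; exact ⟨s1, hs1, rfl⟩
        · have hg : gRec (t :: r) l p = gRec r (l + t) p := min_eq_left h
          rw [hg, he1, List.sum_cons]; congr 1; ring
      · refine ⟨s2, ?_, ?_⟩
        · simp only [subsetSums, List.mem_append]
          left; exact hs2
        · have hg : gRec (t :: r) l p = gRec r l (p + t) := min_eq_right h
          rw [hg, he2, List.sum_cons]; congr 1; ring
    · intro s hs
      simp only [subsetSums, List.mem_append, List.mem_map] at hs
      rcases hs with hs | ⟨s', hs', rfl⟩
      · have hle := hb2 s hs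
        calc gRec (t :: r) l p ≤ gRec r l (p + t) := min_le_right _ _
          _ ≤ |l - (p + t) + 2 * s - r.sum| := hle
          _ = |l - p + 2 * s - (t :: r).sum| := by rw [List.sum_cons]; congr 1; ring
      · have hle := hb1 s' hs'
        calc gRec (t :: r) l p ≤ gRec r (l + t) p := min_le_left _ _
          _ ≤ |l + t - p + 2 * s' - r.sum| := hle
          _ = |l - p + 2 * (s' + t) - (t :: r).sum| := by rw [List.sum_cons]; congr 1; ring

-- B's fold: membership characterization.
lemma foldB_mem (T : List Int) : ∀ (acc : List Int) (x : Int),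
    x ∈ T.foldl (fun acc t => PySem.Set.union acc (PySem.Set.ofList (acc.map (fun s => s + t)))) acc ↔
      ∃ a ∈ acc, ∃ s ∈ subsetSums T, x = a + s := by
  induction T with
  | nil => intro acc x; simp [subsetSums]
  | cons t r ih =>
    intro acc x
    rw [List.foldl_cons, ih]
    constructor
    · rintro ⟨a, ha, s, hs, rfl⟩
      rw [PySem.Set.mem_union] at ha
      rcases ha with ha | ha
      · refine ⟨a, ha, s, ?_, rfl⟩
        simp only [subsetSums, List.mem_append]; left; exact hs
      · rw [PySem.Set.mem_ofList, List.mem_map] at ha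
        obtain ⟨a', ha', rfl⟩ := ha
        refine ⟨a', ha', s + t, ?_, by ring⟩
        simp only [subsetSums, List.mem_append, List.mem_map]
        right; exact ⟨s, hs, rfl⟩
    · rintro ⟨a, ha, s, hs, rfl⟩
      simp only [subsetSums, List.mem_append, List.mem_map] at hs
      rcases hs with hs | ⟨s', hs', rfl⟩
      · exact ⟨a, by rw [PySem.Set.mem_union]; left; exact ha, s, hs, rfl⟩
      · refine ⟨a + t, ?_, s', hs', by ring⟩
        rw [PySem.Set.mem_union]; right
        rw [PySem.Set.mem_ofList, List.mem_map]; exact ⟨a, ha, rfl⟩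

-- B computes gRec T 0 0.
lemma alt_eq_gRec (T : List Int) : kontenerowiec_alt T = gRec T 0 0 := by
  unfold kontenerowiec_alt
  have hmem : ∀ x, x ∈ T.foldl (fun acc t => PySem.Set.union acc (PySem.Set.ofList (acc.map (fun s => s + t)))) (PySem.Set.ofList [0]) ↔ x ∈ subsetSums T := by
    intro x
    rw [foldB_mem]
    constructor
    · rintro ⟨a, ha, s, hs, rfl⟩
      simp [PySem.Set.ofList] at ha
      subst ha; simpa using hs
    · intro hx; exact ⟨0, by simp [PySem.Set.ofList], x, hx, by ring⟩
  set L := T.foldl (fun acc t => PySem.Set.union acc (PySem.Set.ofList (acc.map (fun s => s + t)))) (PySem.Set.ofList [0]) with hL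
  have hne : L.map (fun s => |T.sum - 2 * s|) ≠ [] := by
    have : (0 : Int) ∈ L := (hmem 0).mpr (zero_mem_subsetSums T)
    intro h
    rcases L with _ | _
    · simp at this
    · simp at h
  have hsome : PySem.List.min? (L.map (fun s => |T.sum - 2 * s|)) (fun x : Int => x) ≠ none := by
    intro h; exact hne ((PySem.List.min?_eq_none_iff _ _).mp h)
  obtain ⟨m, hm⟩ := Option.ne_none_iff_exists'.mp hsome
  show (PySem.List.min? (L.map (fun s => |T.sum - 2 * s|)) (fun x => x)).getD 0 = gRec T 0 0
  rw [hm]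
  simp only [Option.getD_some]
  obtain ⟨⟨s0, hs0, he0⟩, hb0⟩ := gRec_min T 0 0
  have hmmem := PySem.List.min?_mem hm
  have hmmin := PySem.List.min?_isMin hm
  rw [List.mem_map] at hmmem
  obtain ⟨sm, hsm, rfl⟩ := hmmem
  have h1 : gRec T 0 0 ≤ |T.sum - 2 * sm| := by
    have := hb0 sm ((hmem sm).mp hsm)
    calc gRec T 0 0 ≤ |0 - 0 + 2 * sm - T.sum| := this
      _ = |T.sum - 2 * sm| := by rw [← abs_neg]; ring_nf
  have h2 : |T.sum - 2 * sm| ≤ gRec T 0 0 := by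
    have hmem0 : |T.sum - 2 * s0| ∈ L.map (fun s => |T.sum - 2 * s|) :=
      List.mem_map.mpr ⟨s0, (hmem s0).mpr hs0, rfl⟩
    have := hmmin _ hmem0
    calc |T.sum - 2 * sm| ≤ |T.sum - 2 * s0| := this
      _ = gRec T 0 0 := by rw [he0, ← abs_neg]; ring_nf
  omega

-- ---------- A side: memo-table correctness ----------

-- The memo invariant: the table has the right shape and every non-(-1) cell (j, c) holds
-- the pure value gRec (T.drop j) c (prefix_j - c).
def GoodD (T : List Int) (D : List (List Int)) : Prop :=
  D.length = T.length ∧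
  ∀ j : Nat, (hj : j < T.length) →
    (D.getD j []).length = T.sum.toNat ∧
    ∀ c : Nat, c < T.sum.toNat →
      (D.getD j []).getD c (-1) = -1 ∨
      (D.getD j []).getD c (-1) = gRec (T.drop j) (c : Int) ((T.take j).sum - (c : Int))

lemma kontenerowiecF_correct (T : List Int) (hT : ∀ t ∈ T, 0 ≤ t)
    (hsuf : ∀ j < T.length, 0 < (T.drop j).sum) :
    ∀ (fuel : Nat) (j : Nat) (D : List (List Int)) (l p : Int),
      j ≤ T.length → T.length - j ≤ fuel → GoodD T D →
      0 ≤ l → 0 ≤ p → l + p = (T.take j).sum →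
      (kontenerowiecF T fuel D (j : Int) l p).1 = gRec (T.drop j) l p ∧
      GoodD T (kontenerowiecF T fuel D (j : Int) l p).2 := by
  intro fuel
  induction fuel with
  | zero =>
    intro j D l p hj hfuel hD hl hp hlp
    have hjn : j = T.length := by omega
    subst hjn
    rw [kontenerowiecF]
    simp only [PySem.List.len_eq, List.drop_length, gRec]
    exact ⟨rfl, hD⟩
  | succ fuel ih =>
    intro j D l p hj hfuel hD hl hp hlp
    by_cases hjn : j = T.length
    · subst hjn
      rw [kontenerowiecF]
      simp only [PySem.List.len_eq, List.drop_length, gRec]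
      exact ⟨rfl, hD⟩
    · have hjlt : j < T.length := lt_of_le_of_ne hj hjn
      have hne : ((j : Int) = PySem.List.len T) = False := by
        simp only [PySem.List.len_eq, eq_iff_iff, iff_false]
        intro h
        exact hjn (by exact_mod_cast h)
      -- bounds
      have hdropsum : 0 < (T.drop j).sum := hsuf j hjlt
      have htdsum : (T.take j).sum + (T.drop j).sum = T.sum := List.sum_take_add_sum_drop T j
      have hlt : l < T.sum := by omega
      have hsumnn : 0 ≤ T.sum := by
        have : (0:Int) ≤ (T.take j).sum := by omega
        omega
      have hcnat : l.toNat < T.sum.toNat := by omega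
      obtain ⟨hDlen, hrows⟩ := hD
      obtain ⟨hrlen, hcells⟩ := hrows j hjlt
      -- the memo read
      have hcur : PySem.List.pyGetD (PySem.List.pyGetD D (j : Int) []) l (-1)
          = (D.getD j []).getD l.toNat (-1) := by
        rw [PySem.List.pyGetD_natCast, PySem.List.pyGetD_of_nonneg _ _ hl]
      have hp_eq : p = (T.take j).sum - l := by omega
      have hl_cast : ((l.toNat : Int)) = l := Int.toNat_of_nonneg hl
      rw [kontenerowiecF]
      simp only [hne, if_false]
      rcases hcells l.toNat hcnat with hcell | hcell
      · -- cell is -1: compute and store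
        have hcur1 : PySem.List.pyGetD (PySem.List.pyGetD D (j : Int) []) l (-1) = -1 := by
          rw [hcur, hcell]
        simp only [hcur1, ne_eq, not_true_eq_false, if_false]
        -- T[j]
        have htj : PySem.List.pyGetD T (j : Int) 0 = T[j] := by
          rw [PySem.List.pyGetD_natCast]
          exact List.getD_eq_getElem T 0 hjlt
        have htj1 : 0 ≤ T[j] := hT _ (List.getElem_mem hjlt)
        have htake1 : (T.take (j+1)).sum = (T.take j).sum + T[j] := by
          rw [List.take_add_one, List.sum_append, List.getElem?_eq_getElem hjlt]
          simp
        have hdropcons : T.drop j = T[j] :: T.drop (j+1) := List.drop_eq_getElem_cons hjlt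
        have hcast1 : ((j : Int) + 1) = ((j+1 : Nat) : Int) := by push_cast; ring
        rw [htj, hcast1]
        obtain ⟨h1v, h1D⟩ := ih (j+1) D (l + T[j]) p (by omega) (by omega) ⟨hDlen, hrows⟩
          (by omega) hp (by rw [htake1]; omega)
        obtain ⟨h2v, h2D⟩ := ih (j+1)
          (kontenerowiecF T fuel D ((j+1 : Nat) : Int) (l + T[j]) p).2 l (p + T[j])
          (by omega) (by omega) h1D hl (by omega) (by rw [htake1]; omega)
        obtain ⟨h2Dlen, h2rows⟩ := h2D
        constructor
        · simp only [h1v, h2v, hdropcons, gRec]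
        · -- the write preserves GoodD
          set D2 := (kontenerowiecF T fuel
              (kontenerowiecF T fuel D ((j+1 : Nat) : Int) (l + T[j]) p).2
              ((j+1 : Nat) : Int) l (p + T[j])).2 with hD2
          set v := min (kontenerowiecF T fuel D ((j+1 : Nat) : Int) (l + T[j]) p).1
              (kontenerowiecF T fuel
                (kontenerowiecF T fuel D ((j+1 : Nat) : Int) (l + T[j]) p).2
                ((j+1 : Nat) : Int) l (p + T[j])).1 with hv
          have hveq : v = gRec (T.drop j) l p := by
            simp only [hv, h1v, h2v, hdropcons, gRec]
          have hrow2 : (D2.getD j []).length = T.sum.toNat := (h2rows j hjlt).1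
          have hset : PySem.List.pySetD D2 (j : Int)
                (PySem.List.pySetD (PySem.List.pyGetD D2 (j : Int) []) l v)
              = D2.set j ((D2.getD j []).set l.toNat v) := by
            rw [PySem.List.pyGetD_natCast, PySem.List.pySetD_of_nonneg _ _ hl,
              PySem.List.pySetD_natCast]
          rw [hset]
          constructor
          · rw [List.length_set]; exact h2Dlen
          · intro j' hj'
            have hgetrow : ∀ r, ((D2.set j r).getD j' []) = if j' = j then r else D2.getD j' [] := by
              intro r
              split_ifs with hjj
              · subst hjj
                rw [List.getD_eq_getElem _ _ (by rw [List.length_set]; omega),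
                  List.getElem_set_self]
              · rcases Nat.lt_or_ge j' D2.length with hlt' | hge'
                · rw [List.getD_eq_getElem _ _ (by rw [List.length_set]; omega),
                    List.getElem_set_ne (by omega), ← List.getD_eq_getElem]
                · rw [List.getD_eq_default _ _ (by rw [List.length_set]; omega),
                    List.getD_eq_default _ _ (by omega)]
            by_cases hjj : j' = j
            · subst hjj
              rw [hgetrow, if_pos rfl]
              constructor
              · rw [List.length_set]; exact hrow2
              · intro c hc
                by_cases hcl : c = l.toNat
                · subst hcl
                  rw [List.getD_eq_getElem _ _ (by rw [List.length_set]; omega),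
                    List.getElem_set_self, ]
                  right
                  rw [hveq, hl_cast, ← hp_eq]
                · rw [List.getD_eq_getElem _ _ (by rw [List.length_set]; omega),
                    List.getElem_set_ne (by omega), ← List.getD_eq_getElem]
                  exact (h2rows j' hj').2 c hc
            · rw [hgetrow, if_neg hjj]
              exact h2rows j' hj'
      · -- memo hit: the stored value is the pure value
        have hgnn := gRec_nonneg (T.drop j) (l.toNat : Int) ((T.take j).sum - (l.toNat : Int))
        have hcur2 : PySem.List.pyGetD (PySem.List.pyGetD D (j : Int) []) l (-1)
            = gRec (T.drop j) l p := by
          rw [hcur, hcell, hl_cast, ← hp_eq]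
        have hne2 : (PySem.List.pyGetD (PySem.List.pyGetD D (j : Int) []) l (-1) ≠ -1) := by
          rw [hcur2]
          have := gRec_nonneg (T.drop j) l p
          omega
        simp only [ne_eq, hne2, not_false_eq_true, if_true]
        exact ⟨hcur2, ⟨hDlen, hrows⟩⟩

lemma a_eq_gRec (T : List Int) (hT : ∀ t ∈ T, 0 ≤ t)
    (hsuf : ∀ j < T.length, 0 < (T.drop j).sum) : kontenerowiec T = gRec T 0 0 := by
  unfold kontenerowiec
  have hsum : T.foldl (fun s x => s + x) 0 = T.sum := by
    rw [List.sum_eq_foldl]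
  have hrow : (PySem.List.pyRange 0 (T.foldl (fun s x => s + x) 0) 1).map (fun _ => (-1 : Int))
      = List.replicate T.sum.toNat (-1) := by
    rw [List.map_const', PySem.List.length_pyRange_one, hsum]
    simp
  have hD0 : ((PySem.List.pyRange 0 (PySem.List.len T) 1).map
        (fun _ => (PySem.List.pyRange 0 (T.foldl (fun s x => s + x) 0) 1).map (fun _ => (-1 : Int))))
      = List.replicate T.length (List.replicate T.sum.toNat (-1)) := by
    rw [hrow, List.map_const', PySem.List.length_pyRange_one, PySem.List.len_eq]
    simp
  have hGood : GoodD T (List.replicate T.length (List.replicate T.sum.toNat (-1))) := by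
    constructor
    · exact List.length_replicate
    · intro j hj
      have hr : (List.replicate T.length (List.replicate T.sum.toNat (-1))).getD j []
          = List.replicate T.sum.toNat (-1 : Int) := by
        rw [List.getD_eq_getElem _ _ (by simpa using hj), List.getElem_replicate]
      rw [hr]
      refine ⟨List.length_replicate, ?_⟩
      intro c hc
      left
      rw [List.getD_eq_getElem _ _ (by simpa using hc), List.getElem_replicate]
  have := (kontenerowiecF_correct T hT hsuf T.length 0
    (List.replicate T.length (List.replicate T.sum.toNat (-1))) 0 0
    (by omega) (by omega) hGood le_rfl le_rfl (by simp)).1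
  simp only [Nat.cast_zero, List.drop_zero] at this
  show (kontenerowiecF T T.length ((PySem.List.pyRange 0 (PySem.List.len T) 1).map
      (fun _ => (PySem.List.pyRange 0 (T.foldl (fun s x => s + x) 0) 1).map (fun _ => (-1 : Int))))
      0 0 0).1 = gRec T 0 0
  rw [hD0, this]

-- ===== VERDICT (by name: the statement is the Claim_ definition above) =====
theorem kontenerowiec_spec : Claim_equal_kontenerowiec := by
  intro T _ hPre
  unfold Spec_kontenerowiec
  rw [a_eq_gRec T hPre.1 hPre.2, alt_eq_gRec]
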